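-- pv_equiv track=rewrite | github.com/felipe-thome/unicamp-mc102 | lab11.py | fit
-- ===== SOURCE A (Python) =====
-- def fit(p, t):
--     encaixes = 0
--     for x in range((len(t) - len(p)) + 1):
--         for y in range((len(t[0]) - len(p[0])) + 1):
--             encaixou = True
--             for i in range(len(p)):
--                 for j in range(len(p[0])):
--                     if p[i][j] == t[i + x][j + y] == "X":
--                         encaixou = False
--             if encaixou:
--                 encaixes += 1
--     return encaixes
-- ===== SOURCE B (Python) =====
-- def fit(p, t):
--     if not t:
--         return 0
--     rows = len(t) - len(p) + 1
--     cols = len(t[0]) - len(p[0]) + 1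
--     px = [(a, b)
--           for a, row in enumerate(p)
--           for b, ch in enumerate(row[:len(p[0])]) if ch == 'X']
--     bad = set()
--     for i, trow in enumerate(t):
--         for j, ch in enumerate(trow):
--             if ch == 'X':
--                 for a, b in px:
--                     x, y = i - a, j - b
--                     if 0 <= x < rows and 0 <= y < cols:
--                         bad.add((x, y))
--     return max(rows, 0) * max(cols, 0) - len(bad)
-- ===== Notes on version B (the rewrite author's own statement) =====
-- stated objective: alternative
-- what changed: B inverts the scan: instead of testing every placement against the whole pattern, it enumerates the 'X' cells of t once, marks in a hash set every placement that each (t-X, pattern-X) pair of cells would invalidate, and returns total placements minus the set's size.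
import Mathlib
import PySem

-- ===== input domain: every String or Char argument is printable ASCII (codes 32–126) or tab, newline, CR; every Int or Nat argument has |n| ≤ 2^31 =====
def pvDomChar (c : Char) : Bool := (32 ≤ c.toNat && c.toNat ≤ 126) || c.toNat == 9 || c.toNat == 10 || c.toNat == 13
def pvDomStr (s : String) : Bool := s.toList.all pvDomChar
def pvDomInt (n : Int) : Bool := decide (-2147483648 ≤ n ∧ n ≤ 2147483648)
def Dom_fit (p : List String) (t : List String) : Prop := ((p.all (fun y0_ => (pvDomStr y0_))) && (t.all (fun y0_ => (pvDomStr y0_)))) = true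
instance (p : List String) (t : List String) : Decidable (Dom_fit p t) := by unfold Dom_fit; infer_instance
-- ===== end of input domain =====

-- B inverts the scan: it enumerates the 'X' cells of t once, marks in a set every placement
-- that each (t-X, pattern-X) pair of cells would invalidate, and returns total placements
-- minus the set's size — instead of A's per-placement full pattern check.
-- Equivalence is about the return value only (neither program mutates its arguments).

-- ===== PORT A =====
-- xs[i][j] as chained Python indexing: none = IndexError (exact)
def pvGet2 (ls : List String) (i j : Int) : Option Char :=
  (PySem.List.pyGet? ls i).bind (fun s => PySem.Str.pyGet? s j)

def fit (p : List String) (t : List String) : Int :=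
  (PySem.List.pyRange 0 ((t.length : Int) - (p.length : Int) + 1) 1).foldl (fun encaixes x =>
    (PySem.List.pyRange 0 (PySem.Str.len (PySem.List.pyGetD t 0 "") - PySem.Str.len (PySem.List.pyGetD p 0 "") + 1) 1).foldl (fun encaixes y =>
      let encaixou :=
        (PySem.List.pyRange 0 (p.length : Int) 1).foldl (fun enc i =>
          (PySem.List.pyRange 0 (PySem.Str.len (PySem.List.pyGetD p 0 "")) 1).foldl (fun enc j =>
            if pvGet2 p i j == pvGet2 t (i + x) (j + y) && pvGet2 t (i + x) (j + y) == some 'X' then false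
            else enc) enc) true
      if encaixou then encaixes + 1 else encaixes) encaixes) 0

-- ===== PORT B =====
-- the 'X' coordinates of the first w columns of the pattern (Source B's `px` comprehension)
def pvPx (p : List String) (w : Int) : List (Int × Int) :=
  (PySem.List.enumerate p 0).flatMap (fun ar =>
    ((PySem.List.enumerate (PySem.List.slice ar.2.toList none (some w)) 0).filter
      (fun bc => bc.2 == 'X')).map (fun bc => (ar.1, bc.1)))

def fit_alt (p : List String) (t : List String) : Int :=
  if t = [] then 0
  else
    let rows : Int := (t.length : Int) - (p.length : Int) + 1
    let cols : Int := PySem.Str.len (PySem.List.pyGetD t 0 "") - PySem.Str.len (PySem.List.pyGetD p 0 "") + 1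
    let px := pvPx p (PySem.Str.len (PySem.List.pyGetD p 0 ""))
    let bad : PySem.Set (Int × Int) :=
      (PySem.List.enumerate t 0).foldl (fun s ir =>
        (PySem.List.enumerate ir.2.toList 0).foldl (fun s jc =>
          if jc.2 == 'X' then
            px.foldl (fun s ab =>
              if 0 ≤ ir.1 - ab.1 ∧ ir.1 - ab.1 < rows ∧ 0 ≤ jc.1 - ab.2 ∧ jc.1 - ab.2 < cols then
                PySem.Set.add s (ir.1 - ab.1, jc.1 - ab.2)
              else s) s
          else s) s) PySem.Set.empty
    max rows 0 * max cols 0 - PySem.Set.len bad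

-- ===== PRECONDITION & SPEC =====
-- Pre_fit is exactly the set of inputs on which the Python A returns (A raises IndexError on
-- empty p, on empty t when the placement loop runs, and on ragged rows it actually indexes;
-- a width-0 pattern indexes nothing, so A returns there whatever the row lengths are).
-- The ports agree on every input with p ≠ [] (out-of-range lookups are none on both sides);
-- the proof uses only that much of Pre_; the rest only delimits where the Python A returns.
def Pre_fit (p : List String) (t : List String) : Prop :=
  p ≠ [] ∧ ((t.length : Int) < (p.length : Int) ∨
    (t ≠ [] ∧ (PySem.Str.len t.headI < PySem.Str.len p.headI ∨ PySem.Str.len p.headI = 0 ∨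
      ((∀ r ∈ p, PySem.Str.len p.headI ≤ PySem.Str.len r) ∧
       (∀ r ∈ t, PySem.Str.len t.headI ≤ PySem.Str.len r)))))
instance (p : List String) (t : List String) : Decidable (Pre_fit p t) := by unfold Pre_fit; infer_instance
def pvWitness_fit : List String × List String := (["X."], ["..X", ".X."])
def Spec_fit (p : List String) (t : List String) (out : Int) : Prop := out = fit_alt p t
instance (p : List String) (t : List String) (out : Int) : Decidable (Spec_fit p t out) := by unfold Spec_fit; infer_instance

-- ===== CLAIM (what is proved, stated in full; the proofs are below) =====
def Claim_equal_fit : Prop := ∀ (p : List String) (t : List String), Dom_fit p t → Pre_fit p t → Spec_fit p t (fit p t)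

-- ===== LEMMAS AND PROOFS =====

-- the placement grid, the conflict predicate, and the flattened list of marked placements
def pvGrid (rows cols : Int) : List (Int × Int) :=
  (PySem.List.pyRange 0 rows 1).flatMap (fun x => (PySem.List.pyRange 0 cols 1).map (fun y => (x, y)))

def pvBadB (p t : List String) (w : Int) (s : Int × Int) : Bool :=
  (pvPx p w).any (fun ab => pvGet2 t (s.1 + ab.1) (s.2 + ab.2) == some 'X')

def pvCand (px : List (Int × Int)) (rows cols i j : Int) : List (Int × Int) :=
  (px.filter (fun ab => decide (0 ≤ i - ab.1 ∧ i - ab.1 < rows ∧ 0 ≤ j - ab.2 ∧ j - ab.2 < cols))).map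
    (fun ab => (i - ab.1, j - ab.2))

def pvBig (p t : List String) (w rows cols : Int) : List (Int × Int) :=
  (PySem.List.enumerate t 0).flatMap (fun ir =>
    (PySem.List.enumerate ir.2.toList 0).flatMap (fun jc =>
      if jc.2 == 'X' then pvCand (pvPx p w) rows cols ir.1 jc.1 else []))

lemma mem_pvPx (p : List String) (w : Int) (hw0 : 0 ≤ w) (m : Int × Int) :
    m ∈ pvPx p w ↔ ∃ (i : Nat) (r : String), p[i]? = some r ∧
      ∃ (j : Nat), (j : Int) < w ∧ r.toList[j]? = some 'X' ∧ m = ((i : Int), (j : Int)) := by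
  unfold pvPx
  simp only [List.mem_flatMap, List.mem_map, List.mem_filter,
    PySem.List.mem_enumerate_iff, PySem.List.slice_to _ hw0]
  constructor
  · rintro ⟨a, ⟨k, hk, rfl⟩, a1, ⟨⟨k2, hk2, rfl⟩, hX⟩, hm⟩
    simp only [beq_iff_eq] at hX
    rw [List.getElem_take] at hX
    simp only [List.length_take, lt_min_iff] at hk2
    refine ⟨k, p[k], List.getElem?_eq_getElem hk, k2, by omega, ?_, ?_⟩
    · rw [List.getElem?_eq_getElem hk2.2]
      exact congrArg some hX
    · simpa using hm.symm
  · rintro ⟨i, r, hr, j, hjw, hj, rfl⟩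
    obtain ⟨hi, hpi⟩ := List.getElem?_eq_some_iff.mp hr
    subst hpi
    obtain ⟨hjlen, hrj⟩ := List.getElem?_eq_some_iff.mp hj
    have hjt : j < w.toNat := by omega
    have hjtake : j < (List.take w.toNat p[i].toList).length := by
      simp only [List.length_take, lt_min_iff]; exact ⟨hjt, hjlen⟩
    refine ⟨(0 + (i : Int), p[i]), ⟨i, hi, rfl⟩,
      (0 + (j : Int), (List.take w.toNat p[i].toList)[j]'hjtake), ⟨⟨j, hjtake, rfl⟩, ?_⟩, by simp⟩
    simp only [beq_iff_eq]
    rw [List.getElem_take]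
    exact hrj

lemma pvGet2_eq_some_iff (ls : List String) (i j : Int) (hi : 0 ≤ i) (hj : 0 ≤ j) (c : Char) :
    pvGet2 ls i j = some c ↔
      ∃ r, ls[i.toNat]? = some r ∧ r.toList[j.toNat]? = some c := by
  simp [pvGet2, Option.bind_eq_some_iff, PySem.List.pyGet?_of_nonneg _ hi,
    PySem.List.pyGet?_of_nonneg _ hj]

-- A's per-placement double loop decides exactly "no pattern-X over a t-X"
lemma cond_eq (p t : List String) (x y : Int) :
    ((PySem.List.pyRange 0 (p.length : Int) 1).foldl (fun enc i =>
      (PySem.List.pyRange 0 (PySem.Str.len (PySem.List.pyGetD p 0 "")) 1).foldl (fun enc j =>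
        if pvGet2 p i j == pvGet2 t (i + x) (j + y) && pvGet2 t (i + x) (j + y) == some 'X' then false
        else enc) enc) true)
    = !pvBadB p t (PySem.Str.len (PySem.List.pyGetD p 0 "")) (x, y) := by
  set w : Int := PySem.Str.len (PySem.List.pyGetD p 0 "") with hw
  have hw0 : 0 ≤ w := by simp [hw]
  have hfun : (fun (enc : Bool) (i : Int) =>
      (PySem.List.pyRange 0 w 1).foldl (fun enc j =>
        if pvGet2 p i j == pvGet2 t (i + x) (j + y) && pvGet2 t (i + x) (j + y) == some 'X' then false
        else enc) enc)
      = (fun (enc : Bool) (i : Int) =>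
        if (PySem.List.pyRange 0 w 1).any (fun j =>
          pvGet2 p i j == pvGet2 t (i + x) (j + y) && pvGet2 t (i + x) (j + y) == some 'X') then false else enc) := by
    funext acc i
    rw [PySem.List.foldl_if_false_eq]
    cases h : (PySem.List.pyRange 0 w 1).any (fun j =>
      pvGet2 p i j == pvGet2 t (i + x) (j + y) && pvGet2 t (i + x) (j + y) == some 'X') <;> simp
  rw [hfun, PySem.List.foldl_if_false_eq, Bool.true_and]
  unfold pvBadB
  congr 1
  rw [Bool.eq_iff_iff]
  simp only [List.any_eq_true, PySem.List.mem_pyRange_one, Bool.and_eq_true, beq_iff_eq]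
  constructor
  · rintro ⟨i, ⟨hi0, hih⟩, j, ⟨hj0, hjw⟩, hpt, htX⟩
    have hpX : pvGet2 p i j = some 'X' := hpt.trans htX
    obtain ⟨r, hr, hrj⟩ := (pvGet2_eq_some_iff p i j hi0 hj0 'X').mp hpX
    refine ⟨(i, j), ?_, ?_⟩
    · rw [mem_pvPx p w hw0]
      refine ⟨i.toNat, r, hr, j.toNat, by omega, hrj, ?_⟩
      simp [Int.toNat_of_nonneg hi0, Int.toNat_of_nonneg hj0]
    · simp only
      rw [Int.add_comm x i, Int.add_comm y j]
      exact htX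
  · rintro ⟨⟨i, j⟩, hm, hc⟩
    rw [mem_pvPx p w hw0] at hm
    obtain ⟨iN, r, hr, jN, hjw, hjX, heq⟩ := hm
    obtain ⟨rfl, rfl⟩ := Prod.mk.inj heq
    simp only at hc
    have hiN : iN < p.length := by
      have := List.getElem?_eq_some_iff.mp hr
      exact this.1
    have htX : pvGet2 t ((iN : Int) + x) ((jN : Int) + y) = some 'X' := by
      rw [Int.add_comm (iN : Int) x, Int.add_comm (jN : Int) y]
      exact hc
    refine ⟨(iN : Int), ⟨by positivity, by exact_mod_cast hiN⟩, (jN : Int), ⟨by positivity, hjw⟩, ?_, htX⟩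
    rw [htX]
    rw [pvGet2_eq_some_iff p _ _ (by positivity) (by positivity)]
    exact ⟨r, by simpa using hr, by simpa using hjX⟩

-- counting: A's double counting fold is countP over the placement grid
lemma foldl2_count (L1 L2 : List Int) (f : Int → Int → Bool) (init : Int) :
    L1.foldl (fun c x => L2.foldl (fun c y => if f x y then c + 1 else c) c) init
      = init + ((L1.flatMap (fun x => L2.map (fun y => (x, y)))).countP (fun s => f s.1 s.2) : Int) := by
  induction L1 generalizing init with
  | nil => simp
  | cons a L1 ih =>
      rw [List.foldl_cons, ih, PySem.List.foldl_if_add_one (fun y => f a y)]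
      rw [List.flatMap_cons, List.countP_append, List.countP_map]
      simp only [Function.comp_def]
      push_cast
      ring

-- B's innermost conditional-add loop is a Set.update with the filtered candidate list
lemma foldl_ite_add_eq_update (l : List (Int × Int)) (rows cols i j : Int) (s : PySem.Set (Int × Int)) :
    l.foldl (fun s ab =>
        if 0 ≤ i - ab.1 ∧ i - ab.1 < rows ∧ 0 ≤ j - ab.2 ∧ j - ab.2 < cols then
          PySem.Set.add s (i - ab.1, j - ab.2)
        else s) s
      = PySem.Set.update s (pvCand l rows cols i j) := by
  induction l generalizing s with
  | nil => rfl
  | cons ab l ih =>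
      by_cases h : 0 ≤ i - ab.1 ∧ i - ab.1 < rows ∧ 0 ≤ j - ab.2 ∧ j - ab.2 < cols
      · rw [List.foldl_cons, if_pos h, ih]
        unfold pvCand
        rw [List.filter_cons_of_pos (by simpa using h), List.map_cons]
        rfl
      · rw [List.foldl_cons, if_neg h, ih]
        unfold pvCand
        rw [List.filter_cons_of_neg (by simpa using h)]

-- folding Set.update over a list flattens
lemma foldl_update_eq_flatMap {α : Type} (l : List α) (g : α → List (Int × Int)) (s : PySem.Set (Int × Int)) :
    l.foldl (fun s x => PySem.Set.update s (g x)) s = PySem.Set.update s (l.flatMap g) := by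
  induction l generalizing s with
  | nil => rfl
  | cons a l ih =>
      rw [List.foldl_cons, ih, List.flatMap_cons]
      show _ = ((g a ++ l.flatMap g).foldl PySem.Set.add s)
      rw [List.foldl_append]
      rfl

-- the set B builds is exactly set(pvBig …)
lemma bad_eq_ofList (p t : List String) (w rows cols : Int) :
    (PySem.List.enumerate t 0).foldl (fun s ir =>
        (PySem.List.enumerate ir.2.toList 0).foldl (fun s jc =>
          if jc.2 == 'X' then
            (pvPx p w).foldl (fun s ab =>
              if 0 ≤ ir.1 - ab.1 ∧ ir.1 - ab.1 < rows ∧ 0 ≤ jc.1 - ab.2 ∧ jc.1 - ab.2 < cols then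
                PySem.Set.add s (ir.1 - ab.1, jc.1 - ab.2)
              else s) s
          else s) s) PySem.Set.empty
      = PySem.Set.ofList (pvBig p t w rows cols) := by
  have hinner : ∀ (i : Int) (row : List Char) (s : PySem.Set (Int × Int)),
      (PySem.List.enumerate row 0).foldl (fun s jc =>
        if jc.2 == 'X' then
          (pvPx p w).foldl (fun s ab =>
            if 0 ≤ i - ab.1 ∧ i - ab.1 < rows ∧ 0 ≤ jc.1 - ab.2 ∧ jc.1 - ab.2 < cols then
              PySem.Set.add s (i - ab.1, jc.1 - ab.2)
            else s) s
        else s) s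
      = PySem.Set.update s ((PySem.List.enumerate row 0).flatMap (fun jc =>
          if jc.2 == 'X' then pvCand (pvPx p w) rows cols i jc.1 else [])) := by
    intro i row s
    rw [← foldl_update_eq_flatMap]
    apply PySem.List.foldl_congr_mem
    intro s' jc _
    by_cases h : jc.2 = 'X'
    · simp only [h, beq_self_eq_true, if_true]
      exact foldl_ite_add_eq_update (pvPx p w) rows cols i jc.1 s'
    · have : (jc.2 == 'X') = false := by simpa using h
      simp only [this, Bool.false_eq_true, if_false]
      rfl
  calc (PySem.List.enumerate t 0).foldl (fun s ir =>
        (PySem.List.enumerate ir.2.toList 0).foldl (fun s jc =>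
          if jc.2 == 'X' then
            (pvPx p w).foldl (fun s ab =>
              if 0 ≤ ir.1 - ab.1 ∧ ir.1 - ab.1 < rows ∧ 0 ≤ jc.1 - ab.2 ∧ jc.1 - ab.2 < cols then
                PySem.Set.add s (ir.1 - ab.1, jc.1 - ab.2)
              else s) s
          else s) s) PySem.Set.empty
      = (PySem.List.enumerate t 0).foldl (fun s ir =>
          PySem.Set.update s ((PySem.List.enumerate ir.2.toList 0).flatMap (fun jc =>
            if jc.2 == 'X' then pvCand (pvPx p w) rows cols ir.1 jc.1 else []))) PySem.Set.empty := by
        apply PySem.List.foldl_congr_mem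
        intro s ir _
        exact hinner ir.1 ir.2.toList s
    _ = PySem.Set.ofList (pvBig p t w rows cols) := by
        rw [foldl_update_eq_flatMap]
        rfl

-- membership in the flattened marked-placement list
lemma mem_pvBig (p t : List String) (w rows cols : Int) (hw0 : 0 ≤ w) (s : Int × Int) :
    s ∈ pvBig p t w rows cols ↔
      (0 ≤ s.1 ∧ s.1 < rows ∧ 0 ≤ s.2 ∧ s.2 < cols) ∧ pvBadB p t w s = true := by
  obtain ⟨x, y⟩ := s
  unfold pvBig pvBadB
  simp only [List.mem_flatMap, PySem.List.mem_enumerate_iff, List.any_eq_true]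
  constructor
  · rintro ⟨ir, ⟨k, hk, rfl⟩, jc, ⟨k2, hk2, rfl⟩, hjc⟩
    dsimp only at hjc hk2 ⊢
    by_cases hc : (t[k].toList[k2] == 'X') = true
    · rw [if_pos hc] at hjc
      unfold pvCand at hjc
      rw [List.mem_map] at hjc
      obtain ⟨ab, hab', heq⟩ := hjc
      rw [List.mem_filter] at hab'
      obtain ⟨hab, hrange⟩ := hab'
      simp only [decide_eq_true_eq] at hrange
      obtain ⟨rfl, rfl⟩ := Prod.mk.inj heq
      refine ⟨hrange, ⟨ab, hab, ?_⟩⟩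
      have h1 : (0 : Int) + k - ab.1 + ab.1 = (0 : Int) + k := by ring
      have h2 : (0 : Int) + k2 - ab.2 + ab.2 = (0 : Int) + k2 := by ring
      rw [h1, h2]
      simp only [beq_iff_eq]
      rw [pvGet2_eq_some_iff t _ _ (by positivity) (by positivity)]
      refine ⟨t[k], by simp [List.getElem?_eq_getElem hk], ?_⟩
      have hcell : t[k].toList[k2]? = some 'X' := by
        rw [List.getElem?_eq_getElem hk2]
        simpa using hc
      simpa using hcell
    · rw [if_neg hc] at hjc
      simp at hjc
  · rintro ⟨⟨hx0, hxr, hy0, hyc⟩, ⟨ab, hab, hX⟩⟩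
    obtain ⟨iN, r, hr, jN, hjw, hjX, habeq⟩ := (mem_pvPx p w hw0 ab).mp hab
    subst habeq
    dsimp only at hX
    simp only [beq_iff_eq] at hX
    rw [pvGet2_eq_some_iff t _ _ (by omega) (by omega)] at hX
    obtain ⟨row, hrow, hcell⟩ := hX
    obtain ⟨hklt, hrowv⟩ := List.getElem?_eq_some_iff.mp hrow
    obtain ⟨hk2lt, hcellv⟩ := List.getElem?_eq_some_iff.mp hcell
    have hni : (0 : Int) ≤ x + iN := by omega
    have hnj : (0 : Int) ≤ y + jN := by omega
    refine ⟨((x + iN).toNat, row), ⟨(x + iN).toNat, hklt, by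
        simp [hrowv, Int.toNat_of_nonneg hni]⟩, ?_⟩
    refine ⟨((y + jN).toNat, 'X'), ⟨(y + jN).toNat, hk2lt, by
        simp [hcellv, Int.toNat_of_nonneg hnj]⟩, ?_⟩
    dsimp only
    rw [if_pos (by simp)]
    unfold pvCand
    rw [List.mem_map]
    refine ⟨(iN, jN), List.mem_filter.mpr ⟨hab, ?_⟩, ?_⟩
    · dsimp only
      simp only [decide_eq_true_eq]
      rw [Int.toNat_of_nonneg hni, Int.toNat_of_nonneg hnj]
      refine ⟨by omega, by omega, by omega, by omega⟩
    · dsimp only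
      rw [Int.toNat_of_nonneg hni, Int.toNat_of_nonneg hnj]
      rw [Prod.mk.injEq]
      constructor <;> ring

lemma mem_pvGrid (rows cols : Int) (s : Int × Int) :
    s ∈ pvGrid rows cols ↔ 0 ≤ s.1 ∧ s.1 < rows ∧ 0 ≤ s.2 ∧ s.2 < cols := by
  unfold pvGrid
  simp only [List.mem_flatMap, PySem.List.mem_pyRange_one, List.mem_map]
  constructor
  · rintro ⟨x, ⟨hx0, hxr⟩, y, ⟨hy0, hyc⟩, rfl⟩
    exact ⟨hx0, hxr, hy0, hyc⟩
  · rintro ⟨hx0, hxr, hy0, hyc⟩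
    exact ⟨s.1, ⟨hx0, hxr⟩, s.2, ⟨hy0, hyc⟩, rfl⟩

lemma nodup_pvGrid (rows cols : Int) : (pvGrid rows cols).Nodup :=
  List.Nodup.product (PySem.List.nodup_pyRange_one 0 rows) (PySem.List.nodup_pyRange_one 0 cols)

lemma length_pvGrid (rows cols : Int) :
    (pvGrid rows cols).length = rows.toNat * cols.toNat := by
  unfold pvGrid
  rw [List.length_flatMap]
  simp [PySem.List.length_pyRange_one, List.map_const', List.sum_replicate, smul_eq_mul]

lemma countP_add_countP_not (l : List (Int × Int)) (f : Int × Int → Bool) :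
    l.countP f + l.countP (fun s => !f s) = l.length := by
  induction l with
  | nil => simp
  | cons a l ih =>
      simp only [List.countP_cons, List.length_cons]
      cases h : f a
      · simp only [Bool.not_false, Bool.false_eq_true, if_false, if_true]
        omega
      · simp only [Bool.not_true, Bool.false_eq_true, if_false, if_true]
        omega

-- |set(pvBig …)| counts the bad placements of the grid
lemma len_bad_eq_countP (p t : List String) (w rows cols : Int) (hw0 : 0 ≤ w) :
    (PySem.Set.ofList (pvBig p t w rows cols)).length
      = (pvGrid rows cols).countP (fun s => pvBadB p t w s) := by
  rw [List.countP_eq_length_filter]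
  apply List.Perm.length_eq
  rw [List.perm_ext_iff_of_nodup (PySem.Set.nodup_ofList _)
    ((nodup_pvGrid rows cols).filter _)]
  intro s
  rw [PySem.Set.mem_ofList, mem_pvBig p t w rows cols hw0 s, List.mem_filter, mem_pvGrid]

-- the main equation, for p ≠ []
lemma fit_eq (p t : List String) (hp : p ≠ []) : fit p t = fit_alt p t := by
  by_cases ht : t = []
  · subst ht
    have h1 : 0 < p.length := List.length_pos_iff.mpr hp
    have hnil : PySem.List.pyRange 0 ((List.length ([] : List String) : Int) - (p.length : Int) + 1) 1 = [] :=
      PySem.List.pyRange_one_eq_nil (by simp; omega)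
    unfold fit fit_alt
    rw [hnil]
    simp
  · unfold fit fit_alt
    rw [if_neg ht]
    set w : Int := PySem.Str.len (PySem.List.pyGetD p 0 "") with hwdef
    have hw0 : 0 ≤ w := by simp [hwdef]
    set rows : Int := (t.length : Int) - (p.length : Int) + 1 with hrows
    set cols : Int := PySem.Str.len (PySem.List.pyGetD t 0 "") - w + 1 with hcols
    simp only
    -- A side: rewrite the per-placement condition, then count
    have hA : (PySem.List.pyRange 0 rows 1).foldl (fun encaixes x =>
        (PySem.List.pyRange 0 cols 1).foldl (fun encaixes y =>
          let encaixou :=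
            (PySem.List.pyRange 0 (p.length : Int) 1).foldl (fun enc i =>
              (PySem.List.pyRange 0 w 1).foldl (fun enc j =>
                if pvGet2 p i j == pvGet2 t (i + x) (j + y) && pvGet2 t (i + x) (j + y) == some 'X' then false
                else enc) enc) true
          if encaixou then encaixes + 1 else encaixes) encaixes) 0
        = ((pvGrid rows cols).countP (fun s => !pvBadB p t w s) : Int) := by
      have hfun : (fun (encaixes : Int) (x : Int) =>
          (PySem.List.pyRange 0 cols 1).foldl (fun encaixes y =>
            let encaixou :=
              (PySem.List.pyRange 0 (p.length : Int) 1).foldl (fun enc i =>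
                (PySem.List.pyRange 0 w 1).foldl (fun enc j =>
                  if pvGet2 p i j == pvGet2 t (i + x) (j + y) && pvGet2 t (i + x) (j + y) == some 'X' then false
                  else enc) enc) true
            if encaixou then encaixes + 1 else encaixes) encaixes)
          = (fun (encaixes : Int) (x : Int) =>
            (PySem.List.pyRange 0 cols 1).foldl (fun encaixes y =>
              if (fun a b => !pvBadB p t w (a, b)) x y then encaixes + 1 else encaixes) encaixes) := by
        funext acc x
        apply PySem.List.foldl_congr_mem
        intro acc' y _
        rw [show ((PySem.List.pyRange 0 (p.length : Int) 1).foldl (fun enc i =>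
              (PySem.List.pyRange 0 w 1).foldl (fun enc j =>
                if pvGet2 p i j == pvGet2 t (i + x) (j + y) && pvGet2 t (i + x) (j + y) == some 'X' then false
                else enc) enc) true) = !pvBadB p t w (x, y) from cond_eq p t x y]
      rw [hfun, foldl2_count (PySem.List.pyRange 0 rows 1) (PySem.List.pyRange 0 cols 1)
        (fun a b => !pvBadB p t w (a, b)) 0]
      simp only [Int.zero_add]
      rfl
    rw [hA, bad_eq_ofList p t w rows cols]
    have hlen : (PySem.Set.len (PySem.Set.ofList (pvBig p t w rows cols)) : Int)
        = ((pvGrid rows cols).countP (fun s => pvBadB p t w s) : Int) := by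
      show ((PySem.Set.ofList (pvBig p t w rows cols)).length : Int) = _
      rw [len_bad_eq_countP p t w rows cols hw0]
    rw [hlen]
    have hsum : (pvGrid rows cols).countP (fun s => !pvBadB p t w s)
        + (pvGrid rows cols).countP (fun s => pvBadB p t w s) = rows.toNat * cols.toNat := by
      rw [← length_pvGrid rows cols]
      have := countP_add_countP_not (pvGrid rows cols) (fun s => pvBadB p t w s)
      omega
    have hmaxr : max rows 0 = (rows.toNat : Int) := (Int.toNat_eq_max rows).symm
    have hmaxc : max cols 0 = (cols.toNat : Int) := (Int.toNat_eq_max cols).symm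
    rw [hmaxr, hmaxc]
    omega

-- ===== VERDICT (by name: the statement is the Claim_ definition above) =====
theorem fit_spec : Claim_equal_fit := by
  intro p t _ hpre
  exact fit_eq p t hpre.1
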